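-- pv_equiv track=rewrite | github.com/kimjiji8105/learn-and-solve-algorithms | 프로그래머스/0/181926. 수 조작하기 1/수 조작하기 1.py | solution
-- ===== SOURCE A (Python) =====
-- def solution(n, control):
--     for cnt in control :
--         if cnt == 'w' :
--             n += 1
--         if cnt == 's' :
--             n -= 1
--         if cnt == 'd' :
--             n += 10
--         if cnt == 'a' :
--             n -= 10
--     return n
-- ===== SOURCE B (Python) =====
-- DELTA = {'w': 1, 's': -1, 'd': 10, 'a': -10}
--
--
-- def _total(s):
--     # divide and conquer: valid because the per-character adjustments commute
--     if len(s) <= 1: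
--         return DELTA.get(s, 0) if s else 0
--     m = len(s) // 2
--     return _total(s[:m]) + _total(s[m:])
--
--
-- def solution(n, control):
--     return n + _total(control)
-- ===== Notes on version B (the rewrite author's own statement) =====
-- stated objective: alternative
-- what changed: Replaces the linear branch-chain accumulator loop with a divide-and-conquer recursion: the string is split in halves, each half's total adjustment (looked up in a delta table instead of four if-branches) is computed recursively and the two totals are added to n; correct because the adjustments commute.
import Mathlib
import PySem

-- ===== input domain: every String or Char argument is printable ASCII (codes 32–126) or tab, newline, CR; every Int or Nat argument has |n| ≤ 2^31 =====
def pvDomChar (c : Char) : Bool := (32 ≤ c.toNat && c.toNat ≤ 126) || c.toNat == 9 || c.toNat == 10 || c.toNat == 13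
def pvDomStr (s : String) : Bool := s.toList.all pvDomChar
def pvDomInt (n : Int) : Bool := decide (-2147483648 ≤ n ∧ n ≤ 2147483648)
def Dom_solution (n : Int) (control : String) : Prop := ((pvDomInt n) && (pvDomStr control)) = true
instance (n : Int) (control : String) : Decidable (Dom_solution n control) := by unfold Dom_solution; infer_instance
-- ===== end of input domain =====

-- B replaces A's linear branch-chain accumulator loop with a divide-and-conquer
-- recursion over string halves using a delta table (objective: alternative).

-- ===== PORT A =====
-- literal port of A: one pass over control, four independent if-updates of n
def solution (n : Int) (control : String) : Int :=
  control.toList.foldl (fun n cnt =>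
    let n := if cnt = 'w' then n + 1 else n
    let n := if cnt = 's' then n - 1 else n
    let n := if cnt = 'd' then n + 10 else n
    let n := if cnt = 'a' then n - 10 else n
    n) n

-- ===== PORT B =====
-- port of Source B's DELTA dict
def pvDELTA : PySem.Dict Char Int := PySem.Dict.ofList [('w', 1), ('s', -1), ('d', 10), ('a', -10)]

-- port of Source B's _total: divide and conquer over the character list (s[:m], s[m:] = take/drop)
def pvTotal (s : List Char) : Int :=
  if s.length ≤ 1 then
    match s with
    | [] => 0
    | c :: _ => PySem.Dict.getD pvDELTA c 0
  else
    let m := s.length / 2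
    pvTotal (s.take m) + pvTotal (s.drop m)
termination_by s.length
decreasing_by
  · simp only [List.length_take]; omega
  · simp only [List.length_drop]; omega

def solution_alt (n : Int) (control : String) : Int :=
  n + pvTotal control.toList

-- ===== PRECONDITION & SPEC =====
def Spec_solution (n : Int) (control : String) (out : Int) : Prop := out = solution_alt n control
instance (n : Int) (control : String) (out : Int) : Decidable (Spec_solution n control out) := by unfold Spec_solution; infer_instance

-- ===== CLAIM (what is proved, stated in full; the proofs are below) =====
def Claim_equal_solution : Prop := ∀ (n : Int) (control : String), Dom_solution n control → Spec_solution n control (solution n control)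

-- ===== LEMMAS AND PROOFS =====

-- the per-character delta of A's branch chain equals B's table lookup
def pvDeltaFn (c : Char) : Int :=
  (if c = 'w' then (1:Int) else 0) - (if c = 's' then 1 else 0)
    + 10 * (if c = 'd' then 1 else 0) - 10 * (if c = 'a' then 1 else 0)

theorem pvDELTA_mk : pvDELTA = PySem.Dict.mk [('w', 1), ('s', -1), ('d', 10), ('a', -10)] := by
  rfl

theorem getD_eq_deltaFn (c : Char) : PySem.Dict.getD pvDELTA c 0 = pvDeltaFn c := by
  by_cases h1 : c = 'w'
  · subst h1; decide
  by_cases h2 : c = 's'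
  · subst h2; decide
  by_cases h3 : c = 'd'
  · subst h3; decide
  by_cases h4 : c = 'a'
  · subst h4; decide
  have e1 : ('w' == c) = false := beq_eq_false_iff_ne.mpr (Ne.symm h1)
  have e2 : ('s' == c) = false := beq_eq_false_iff_ne.mpr (Ne.symm h2)
  have e3 : ('d' == c) = false := beq_eq_false_iff_ne.mpr (Ne.symm h3)
  have e4 : ('a' == c) = false := beq_eq_false_iff_ne.mpr (Ne.symm h4)
  simp [pvDELTA_mk, pvDeltaFn, PySem.Dict.getD_eq_get?_getD, PySem.Dict.get?, List.find?,
    e1, e2, e3, e4, h1, h2, h3, h4]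

theorem pvTotal_eq_sum (s : List Char) : pvTotal s = (s.map pvDeltaFn).sum := by
  induction s using pvTotal.induct with
  | case1 h => rw [pvTotal.eq_def]; simp
  | case2 c tail h =>
    rw [pvTotal.eq_def, if_pos h]
    cases tail with
    | nil => simp [getD_eq_deltaFn]
    | cons x t => simp at h
  | case3 s h m ih1 ih2 =>
    rw [pvTotal.eq_def, if_neg h]
    show pvTotal (s.take m) + pvTotal (s.drop m) = _
    rw [ih1, ih2, ← List.sum_append, ← List.map_append, List.take_append_drop]

theorem foldl_step (l : List Char) (n : Int) :
    l.foldl (fun n cnt =>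
      let n := if cnt = 'w' then n + 1 else n
      let n := if cnt = 's' then n - 1 else n
      let n := if cnt = 'd' then n + 10 else n
      let n := if cnt = 'a' then n - 10 else n
      n) n
    = n + (l.map pvDeltaFn).sum := by
  induction l generalizing n with
  | nil => simp
  | cons hd t ih =>
    rw [List.foldl_cons, ih]
    simp only [pvDeltaFn, List.map_cons, List.sum_cons]
    split_ifs <;> ring

-- ===== VERDICT (restated) =====
theorem solution_spec : Claim_equal_solution := by
  intro n control _
  unfold Spec_solution solution solution_alt
  rw [foldl_step, pvTotal_eq_sum]
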